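-- pv_equiv track=rewrite | github.com/CserYcx/nand2teteris | projects/06/Assembler.py | remove_annotation
-- ===== SOURCE A (Python) =====
-- def remove_annotation(instruction):
--     expr = []
--     for ch in instruction:
--         if ch == '/':
--             break
--         elif ch == ' ':
--             continue
--         else:
--             expr.append(ch)
--     return expr
-- ===== SOURCE B (Python) =====
-- def remove_annotation(instruction):
--     # Backward scan: walk the string from the last character to the first,
--     # resetting the collected characters whenever a '/' is met (everything
--     # gathered so far lies after a comment start), appending non-space
--     # characters, and reversing once at the end.
--     rev = []
--     for i in range(len(instruction) - 1, -1, -1):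
--         ch = instruction[i]
--         if ch == '/':
--             rev.clear()
--         elif ch != ' ':
--             rev.append(ch)
--     rev.reverse()
--     return rev
-- ===== Notes on version B (the rewrite author's own statement) =====
-- stated objective: alternative
-- what changed: Replaces A's forward loop with break/continue by a single backward scan that resets its accumulator on '/' (discarding characters after a comment start), appends kept characters, and reverses once at the end.
import Mathlib
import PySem

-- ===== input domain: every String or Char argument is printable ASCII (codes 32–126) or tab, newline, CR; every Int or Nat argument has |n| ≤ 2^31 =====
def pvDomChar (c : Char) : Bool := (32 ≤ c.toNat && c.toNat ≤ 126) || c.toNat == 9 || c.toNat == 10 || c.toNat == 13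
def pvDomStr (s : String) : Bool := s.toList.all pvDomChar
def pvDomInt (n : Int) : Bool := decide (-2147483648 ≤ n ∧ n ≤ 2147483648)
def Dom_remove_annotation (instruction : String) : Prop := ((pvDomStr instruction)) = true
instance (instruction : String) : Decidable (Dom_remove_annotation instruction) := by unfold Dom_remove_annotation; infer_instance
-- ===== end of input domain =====

-- B replaces A's forward break/continue loop by a backward scan that resets its accumulator on '/' and reverses once at the end (objective: alternative).

-- ===== PORT A =====
-- forward loop over characters: break on '/', skip ' ', else append
def removeAnnotLoop (cs : List Char) (expr : List String) : List String :=
  match cs with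
  | [] => expr
  | ch :: rest =>
    if ch = '/' then expr
    else if ch = ' ' then removeAnnotLoop rest expr
    else removeAnnotLoop rest (expr ++ [ch.toString])

def remove_annotation (instruction : String) : List String :=
  removeAnnotLoop instruction.toList []

-- ===== PORT B =====
-- backward scan (fold over the reversed character list): reset on '/', append non-space; reverse at the end
def altStep (rev : List String) (ch : Char) : List String :=
  if ch = '/' then []
  else if ch = ' ' then rev
  else rev ++ [ch.toString]

def remove_annotation_alt (instruction : String) : List String :=
  (instruction.toList.reverse.foldl altStep []).reverse

-- ===== PRECONDITION & SPEC =====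
def Spec_remove_annotation (instruction : String) (out : List String) : Prop := out = remove_annotation_alt instruction
instance (instruction : String) (out : List String) : Decidable (Spec_remove_annotation instruction out) := by unfold Spec_remove_annotation; infer_instance

-- ===== CLAIM (what is proved, stated in full; the proofs are below) =====
def Claim_equal_remove_annotation : Prop := ∀ (instruction : String), Dom_remove_annotation instruction → Spec_remove_annotation instruction (remove_annotation instruction)

-- ===== LEMMAS AND PROOFS =====
-- A's loop appends, to its accumulator, the spaces-removed pre-'/' prefix.
theorem removeAnnotLoop_eq (cs : List Char) (expr : List String) :
    removeAnnotLoop cs expr =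
      expr ++ ((cs.takeWhile (fun ch => ch ≠ '/')).filter (fun c => c ≠ ' ')).map Char.toString := by
  induction cs generalizing expr with
  | nil => simp [removeAnnotLoop]
  | cons ch rest ih =>
    by_cases h1 : ch = '/'
    · simp [removeAnnotLoop, h1, List.takeWhile]
    · by_cases h2 : ch = ' '
      · simp [removeAnnotLoop, h1, h2, ih, List.takeWhile]
      · simp [removeAnnotLoop, h1, h2, ih, List.takeWhile]

-- B's backward fold produces that same prefix, reversed.
theorem altFold_eq (cs : List Char) :
    cs.reverse.foldl altStep [] =
      (((cs.takeWhile (fun ch => ch ≠ '/')).filter (fun c => c ≠ ' ')).map Char.toString).reverse := by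
  rw [List.foldl_reverse]
  induction cs with
  | nil => simp
  | cons ch rest ih =>
    simp only [List.foldr_cons]
    rw [ih, List.takeWhile_cons]
    by_cases h1 : ch = '/'
    · simp [altStep, h1]
    · by_cases h2 : ch = ' '
      · simp [altStep, h1, h2]
      · simp [altStep, h1, h2]

-- ===== VERDICT (by name: the statement is the Claim_ definition above) =====
theorem remove_annotation_spec : Claim_equal_remove_annotation := by
  intro instruction _
  unfold Spec_remove_annotation remove_annotation remove_annotation_alt
  rw [removeAnnotLoop_eq, altFold_eq]
  simp
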